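-- pv_equiv track=rewrite | github.com/Bellardita-Laboratory/DataOrganizationTool | src/UI/UtilsUI.py | get_fused_limits
-- ===== SOURCE A (Python) =====
-- def get_fused_limits(values:list):
--     """
--         Get the start and end index of the adjacent list elements with the same value
--
--         Example:
--         values = [1,1,1,2,2,3,3,3,3,4,4]
--         get_fused_limits(values) -> [(0, 2), (3, 4), (5, 8), (9, 10)]
--     """
--     if len(values) == 0:
--         return []
--
--     limits : list[tuple[int,int]] = []
--     start = 0
--     previous_value = values[0]
--     for i, value in enumerate(values):
--         if value != previous_value:
--             limits.append((start, i-1))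
--             start = i
--             previous_value = value
--
--     limits.append((start, len(values)-1))
--
--     return limits
-- ===== SOURCE B (Python) =====
-- def get_fused_limits(values: list):
--     if len(values) == 0:
--         return []
--     n = len(values)
--     bounds = [0] + [i for i in range(1, n) if values[i] != values[i - 1]] + [n]
--     return [(b, e - 1) for b, e in zip(bounds, bounds[1:])]
-- ===== Notes on version B (the rewrite author's own statement) =====
-- stated objective: alternative
-- what changed: Replaces A's single emit-on-change scan with state (start, previous_value) by a two-phase structure: first build the list of group boundaries (0, every change index, n), then pair consecutive boundaries into closed ranges.
import Mathlib
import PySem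

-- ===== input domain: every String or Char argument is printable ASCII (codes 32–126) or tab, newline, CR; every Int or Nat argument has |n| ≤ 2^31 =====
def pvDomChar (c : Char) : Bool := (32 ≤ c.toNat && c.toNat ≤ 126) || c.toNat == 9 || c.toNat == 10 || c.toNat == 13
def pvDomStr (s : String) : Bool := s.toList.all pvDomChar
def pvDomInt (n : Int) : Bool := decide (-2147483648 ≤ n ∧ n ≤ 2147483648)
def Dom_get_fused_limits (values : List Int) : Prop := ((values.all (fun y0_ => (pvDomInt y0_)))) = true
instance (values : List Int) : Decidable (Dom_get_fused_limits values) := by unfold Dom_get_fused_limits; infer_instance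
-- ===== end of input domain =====

-- B replaces A's emit-on-change scan by a two-phase structure (boundary list, then pairing
-- consecutive boundaries); objective: alternative decomposition, same O(n) cost.

-- ===== PORT A =====
-- the body of A's for-loop (state = (limits, start, previous_value), element = (i, value))
def pvStepA (st : List (Int × Int) × Int × Int) (p : Int × Int) : List (Int × Int) × Int × Int :=
  if p.2 ≠ st.2.2 then (st.1 ++ [(st.2.1, p.1 - 1)], p.1, p.2) else st

def get_fused_limits (values : List Int) : List (Int × Int) :=
  if values.length = 0 then []
  else
    let st := (PySem.List.enumerate values).foldl pvStepA
      ([], 0, PySem.List.pyGetD values 0 0)   -- previous_value = values[0] (in range: list nonempty)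
    st.1 ++ [(st.2.1, (values.length : Int) - 1)]

-- ===== PORT B =====
-- [(bounds[j], bounds[j+1]-1) for j ...] as zip of bounds with its tail
def pvPairs (bounds : List Int) : List (Int × Int) :=
  (bounds.zip bounds.tail).map (fun p => (p.1, p.2 - 1))

def get_fused_limits_alt (values : List Int) : List (Int × Int) :=
  if values.length = 0 then []
  else
    let n : Int := values.length
    let bounds : List Int :=
      (0 :: (PySem.List.pyRange 1 n 1).filter
        (fun i => PySem.List.pyGet? values i ≠ PySem.List.pyGet? values (i - 1))) ++ [n]
    pvPairs bounds

-- ===== PRECONDITION & SPEC =====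
def Spec_get_fused_limits (values : List Int) (out : List (Int × Int)) : Prop := out = get_fused_limits_alt values
instance (values : List Int) (out : List (Int × Int)) : Decidable (Spec_get_fused_limits values out) := by unfold Spec_get_fused_limits; infer_instance

-- ===== CLAIM (what is proved, stated in full; the proofs are below) =====
def Claim_equal_get_fused_limits : Prop := ∀ (values : List Int), Dom_get_fused_limits values → Spec_get_fused_limits values (get_fused_limits values)

-- ===== LEMMAS AND PROOFS =====

-- the change indices of `values` in [a, values.length), as B's filter computes them
def pvChg (values : List Int) (a : Int) : List Int :=
  (PySem.List.pyRange a (values.length : Int) 1).filter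
    (fun i => PySem.List.pyGet? values i ≠ PySem.List.pyGet? values (i - 1))

theorem pvPairs_cons_cons (a b : Int) (l : List Int) :
    pvPairs (a :: b :: l) = (a, b - 1) :: pvPairs (b :: l) := by
  simp [pvPairs]

-- loop invariant: running A's loop over the suffix starting at index j (with
-- previous_value = values[j-1]) and then appending the final range equals
-- acc ++ the pairs of the remaining boundary list (start :: changes from j :: n).
theorem pvCore (values : List Int) : ∀ (tl : List Int) (j : Nat)
    (acc : List (Int × Int)) (s p : Int),
    values.drop j = tl → 1 ≤ j → values[j - 1]? = some p →
    (let st := (PySem.List.enumerate tl (j : Int)).foldl pvStepA (acc, s, p)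
     st.1 ++ [(st.2.1, (values.length : Int) - 1)])
      = acc ++ pvPairs ((s :: pvChg values (j : Int)) ++ [(values.length : Int)]) := by
  intro tl
  induction tl with
  | nil =>
    intro j acc s p hdrop hj hprev
    have hlen : values.length ≤ j := by
      have := List.drop_eq_nil_iff.mp hdrop
      omega
    have hjlt : j - 1 < values.length := by
      rcases List.getElem?_eq_some_iff.mp hprev with ⟨h, _⟩
      exact h
    have hje : j = values.length := by omega
    simp [PySem.List.enumerate, pvChg, pvPairs, hje]
  | cons v tl' ih =>
    intro j acc s p hdrop hj hprev
    have hjv : values[j]? = some v := by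
      have h := congrArg (fun l => l[0]?) hdrop
      simp only [List.getElem?_drop] at h
      simpa using h
    have hjlt : j < values.length := (List.getElem?_eq_some_iff.mp hjv).1
    have hdrop' : values.drop (j + 1) = tl' := by
      have : values.drop (j + 1) = (values.drop j).tail := by
        rw [List.tail_drop]
      rw [this, hdrop]
      rfl
    have hprev' : values[(j + 1) - 1]? = some v := by simpa using hjv
    have hget_j : PySem.List.pyGet? values (j : Int) = some v := by
      rw [PySem.List.pyGet?_natCast, hjv]
    have hget_jm : PySem.List.pyGet? values ((j : Int) - 1) = some p := by
      have : ((j : Int) - 1) = ((j - 1 : Nat) : Int) := by omega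
      rw [this, PySem.List.pyGet?_natCast, hprev]
    have hchg : pvChg values (j : Int) =
        (if v ≠ p then [(j : Int)] else []) ++ pvChg values ((j : Int) + 1) := by
      unfold pvChg
      rw [PySem.List.pyRange_one_cons (by omega : (j : Int) < (values.length : Int))]
      rw [List.filter_cons]
      by_cases hvp : v = p
      · simp [hget_j, hget_jm, hvp]
      · simp [hget_j, hget_jm, hvp]
    have henum : PySem.List.enumerate (v :: tl') (j : Int)
        = ((j : Int), v) :: PySem.List.enumerate tl' (((j + 1 : Nat) : Int)) := by
      rw [PySem.List.enumerate_cons]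
      norm_num
    rw [henum]
    simp only [List.foldl_cons]
    by_cases hvp : v = p
    · have hstep : pvStepA (acc, s, p) ((j : Int), v) = (acc, s, p) := by
        simp [pvStepA, hvp]
      have hprev2 : values[(j + 1) - 1]? = some p := by
        simp only [hvp] at hjv
        simpa using hjv
      rw [hstep, ih (j + 1) acc s p hdrop' (by omega) hprev2, hchg]
      simp [hvp]
    · have hstep : pvStepA (acc, s, p) ((j : Int), v)
          = (acc ++ [(s, (j : Int) - 1)], (j : Int), v) := by
        simp [pvStepA, hvp]
      rw [hstep, ih (j + 1) (acc ++ [(s, (j : Int) - 1)]) (j : Int) v hdrop' (by omega) hprev', hchg]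
      simp [hvp, pvPairs_cons_cons, List.append_assoc]

-- ===== VERDICT (by name: the statement is the Claim_ definition above) =====
theorem get_fused_limits_spec : Claim_equal_get_fused_limits := by
  intro values _
  unfold Spec_get_fused_limits get_fused_limits get_fused_limits_alt
  cases values with
  | nil => simp
  | cons v rest =>
    simp only [List.length_cons, Nat.succ_ne_zero]
    have h0 : PySem.List.pyGetD (v :: rest) 0 0 = v := by
      have : (0 : Int) = ((0 : Nat) : Int) := rfl
      rw [this, PySem.List.pyGetD_natCast]
      rfl
    have henum : PySem.List.enumerate (v :: rest) 0
        = (0, v) :: PySem.List.enumerate rest ((1 : Nat) : Int) := by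
      rw [PySem.List.enumerate_cons]
      norm_num
    have hstep : pvStepA ([], 0, v) ((0 : Int), v) = ([], 0, v) := by
      simp [pvStepA]
    have hcore := pvCore (v :: rest) rest 1 [] 0 v (by rfl) (by omega) (by simp)
    simp only [List.length_cons] at hcore
    rw [h0, henum]
    simp only [List.foldl_cons, hstep, if_false]
    rw [hcore]
    unfold pvChg
    simp
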